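-- pv_equiv track=rewrite | github.com/n-dryer/wearable-assistant-context-bench | wearable_assistant_context_bench/llm_judge.py | infer_candidate_family
-- ===== SOURCE A (Python) =====
-- def infer_candidate_family(model_id: str) -> str | None:
--     """Infer the candidate model's family from its `--model` string.
--
--     Recognises native and provider-qualified ids for Claude, Gemini,
--     and OpenAI. Routing-layer prefixes (``openrouter/...``,
--     ``huggingface/<provider>/...``) are stripped recursively so the
--     underlying family can be detected.
--
--     Open-weights families served via Inference Providers (Llama, Qwen,
--     Mistral, DeepSeek, Gemma, etc.) are intentionally returned as
--     ``None`` — the cross-family judge map only covers Claude/Gemini/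
--     OpenAI today, so HF candidates must pass ``--judge-family``
--     explicitly. The runner surfaces a clear error in that case.
--
--     Returns:
--         ``"claude"``, ``"gemini"``, ``"openai"``, or ``None``. The
--         runner errors out on ``None`` in ``--judge-family auto``.
--     """
--     if not model_id:
--         return None
--     lowered = model_id.lower()
--     if "/" in lowered:
--         provider, remainder = lowered.split("/", 1)
--         if provider in {"anthropic", "claude"}:
--             return "claude"
--         if provider in {"gemini", "google"}:
--             return "gemini"
--         if provider == "openai":
--             return "openai"
--         if provider == "openrouter" and remainder:
--             return infer_candidate_family(remainder)
--         if provider in {"vertexai", "vertex_ai"} and "gemini" in remainder: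
--             return "gemini"
--         if provider == "huggingface" and remainder:
--             # huggingface/<inference_provider>/<hf_org>/<hf_model>.
--             # Strip the inference-provider segment so we can detect a
--             # closed-family model (e.g. huggingface/together/openai/
--             # gpt-oss-120b → openai). For open-weights candidates
--             # (Llama, Qwen, Mistral, etc.), the recursion returns None
--             # and the caller sees a "pass --judge-family explicitly"
--             # error.
--             if "/" in remainder:
--                 _, inner = remainder.split("/", 1)
--                 inferred = infer_candidate_family(inner)
--                 if inferred is not None:
--                     return inferred
--             return None
--     claude_markers = ("claude", "sonnet", "opus", "haiku")
--     gemini_markers = ("gemini",)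
--     openai_prefixes = ("gpt-", "o1", "o3", "o4")
--     if any(marker in lowered for marker in claude_markers):
--         return "claude"
--     if any(marker in lowered for marker in gemini_markers):
--         return "gemini"
--     if lowered.startswith(openai_prefixes):
--         return "openai"
--     return None
-- ===== SOURCE B (Python) =====
-- _PROVIDER_FAMILY = {
--     "anthropic": "claude",
--     "claude": "claude",
--     "gemini": "gemini",
--     "google": "gemini",
--     "openai": "openai",
-- }
--
-- _MARKER_FAMILY = (
--     ("claude", "claude"),
--     ("sonnet", "claude"),
--     ("opus", "claude"),
--     ("haiku", "claude"),
--     ("gemini", "gemini"),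
-- )
--
--
-- def infer_candidate_family(model_id: str) -> str | None:
--     """Iterative, table-driven re-implementation: lowercase once, loop while
--     stripping routing prefixes, then scan a marker table."""
--     s = model_id.lower()
--     while s:
--         if "/" not in s:
--             break
--         provider, _, remainder = s.partition("/")
--         family = _PROVIDER_FAMILY.get(provider)
--         if family is not None:
--             return family
--         if provider == "openrouter" and remainder:
--             s = remainder
--             continue
--         if provider in ("vertexai", "vertex_ai"):
--             if "gemini" in remainder:
--                 return "gemini"
--             break
--         if provider == "huggingface" and remainder:
--             _, slash, inner = remainder.partition("/")
--             if not slash: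
--                 return None
--             s = inner
--             continue
--         break
--     if not s:
--         return None
--     for marker, family in _MARKER_FAMILY:
--         if marker in s:
--             return family
--     if s.startswith(("gpt-", "o1", "o3", "o4")):
--         return "openai"
--     return None
-- ===== Notes on version B (the rewrite author's own statement) =====
-- stated objective: alternative
-- what changed: Replaces A's recursive prefix-stripping and inline membership if-chains with a single iterative while-loop over one lowercased working string, driven by a provider dict and a marker table scanned via partition/get/find.
import Mathlib
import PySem

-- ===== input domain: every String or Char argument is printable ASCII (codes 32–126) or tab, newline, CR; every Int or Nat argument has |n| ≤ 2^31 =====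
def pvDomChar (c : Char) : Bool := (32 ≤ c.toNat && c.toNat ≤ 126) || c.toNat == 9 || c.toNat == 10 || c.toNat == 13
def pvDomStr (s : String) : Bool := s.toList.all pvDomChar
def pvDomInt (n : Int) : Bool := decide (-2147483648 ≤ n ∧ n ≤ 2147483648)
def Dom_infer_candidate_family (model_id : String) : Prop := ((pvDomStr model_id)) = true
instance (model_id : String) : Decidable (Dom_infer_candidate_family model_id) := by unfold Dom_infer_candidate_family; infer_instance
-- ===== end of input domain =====

-- B rewrites A's recursive prefix stripping as an iterative loop over one lowercased string,
-- driven by a provider table and a marker table (objective: alternative decomposition, same cost).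

-- exact hand port of `s.split("/", 1)` / `s.partition("/")` when '/' is present:
-- the chars before the first '/' and the chars after it
def pvHead (l : List Char) : List Char := l.takeWhile (fun c => c ≠ '/')
def pvRest (l : List Char) : List Char := (l.dropWhile (fun c => c ≠ '/')).tail

-- termination lemma shared by the two recursions: the part after the first '/' is shorter
theorem pvRest_length_lt (l : List Char) (h : PySem.Chars.isIn ['/'] l = true) :
    (pvRest l).length < l.length := by
  unfold pvRest
  have hmem : '/' ∈ l := ((PySem.Chars.isIn_iff_infix _ _).1 h).subset (by simp)
  have hne : l.dropWhile (fun c => c ≠ '/') ≠ [] := by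
    intro hnil
    have := (List.dropWhile_eq_nil_iff).1 hnil '/' hmem
    simp at this
  have h1 := List.length_dropWhile_le (fun c => (c ≠ '/' : Bool)) l
  have h2 : (l.dropWhile (fun c => c ≠ '/')).length ≠ 0 := by
    simpa [List.length_eq_zero_iff] using hne
  rw [List.length_tail]
  omega

-- ===== PORT A =====
-- exact hand port of the marker / prefix checks at the bottom of A (any(...) over literal tuples)
def pvMarkersA (lowered : List Char) : Option String :=
  if (["claude", "sonnet", "opus", "haiku"]).any (fun m => PySem.Chars.isIn m.toList lowered) then some "claude"
  else if (["gemini"]).any (fun m => PySem.Chars.isIn m.toList lowered) then some "gemini"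
  else if (["gpt-", "o1", "o3", "o4"]).any (fun p => PySem.Chars.startswith lowered p.toList) then some "openai"
  else none

-- recursive core of A on the char list of the model id; `s.split("/", 1)` (called only when
-- '/' is present) is ported exactly as (chars before the first '/', chars after it)
def pvInferA (cs : List Char) : Option String :=
  if cs = [] then none
  else
    let lowered := PySem.Chars.lower cs
    if h : PySem.Chars.isIn ['/'] lowered = true then
      let provider := pvHead lowered
      let remainder := pvRest lowered
      if provider = "anthropic".toList ∨ provider = "claude".toList then some "claude"
      else if provider = "gemini".toList ∨ provider = "google".toList then some "gemini"
      else if provider = "openai".toList then some "openai"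
      else if provider = "openrouter".toList ∧ remainder ≠ [] then pvInferA remainder
      else if (provider = "vertexai".toList ∨ provider = "vertex_ai".toList) ∧ PySem.Chars.isIn "gemini".toList remainder = true then some "gemini"
      else if provider = "huggingface".toList ∧ remainder ≠ [] then
        if h2 : PySem.Chars.isIn ['/'] remainder = true then
          match pvInferA (pvRest remainder) with
          | some inferred => some inferred
          | none => none
        else none
      else pvMarkersA lowered
    else pvMarkersA lowered
termination_by cs.length
decreasing_by
  · have ha := pvRest_length_lt (PySem.Chars.lower cs) h
    have hl : (PySem.Chars.lower cs).length = cs.length := by simp [PySem.Chars.lower]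
    omega
  · have ha := pvRest_length_lt (PySem.Chars.lower cs) h
    have hb := pvRest_length_lt _ h2
    rw [show remainder = pvRest (PySem.Chars.lower cs) from rfl] at hb
    have hl : (PySem.Chars.lower cs).length = cs.length := by simp [PySem.Chars.lower]
    omega

def infer_candidate_family (model_id : String) : Option String :=
  pvInferA model_id.toList

-- ===== PORT B =====
def pvProviderFamily : PySem.Dict (List Char) String :=
  PySem.Dict.mk [("anthropic".toList, "claude"), ("claude".toList, "claude"),
                 ("gemini".toList, "gemini"), ("google".toList, "gemini"),
                 ("openai".toList, "openai")]

def pvMarkerFamily : List (List Char × String) :=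
  [("claude".toList, "claude"), ("sonnet".toList, "claude"), ("opus".toList, "claude"),
   ("haiku".toList, "claude"), ("gemini".toList, "gemini")]

-- the code after B's while loop: the `if not s` guard, the for loop over the marker table
-- (early return = find?), and the startswith tuple check
def pvTailB (s : List Char) : Option String :=
  if s = [] then none
  else
    match pvMarkerFamily.find? (fun mf => PySem.Chars.isIn mf.1 s) with
    | some mf => some mf.2
    | none =>
      if (["gpt-", "o1", "o3", "o4"]).any (fun p => PySem.Chars.startswith s p.toList) then some "openai"
      else none

-- B's while loop as a tail recursion on the working string s (already lowercased);
-- `s.partition("/")` is ported exactly as (chars before the first '/', chars after it)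
def pvLoopB (s : List Char) : Option String :=
  if s = [] then none
  else if h : PySem.Chars.isIn ['/'] s = true then
    let provider := pvHead s
    let remainder := pvRest s
    match PySem.Dict.get? pvProviderFamily provider with
    | some family => some family
    | none =>
      if provider = "openrouter".toList ∧ remainder ≠ [] then pvLoopB remainder
      else if provider = "vertexai".toList ∨ provider = "vertex_ai".toList then
        if PySem.Chars.isIn "gemini".toList remainder = true then some "gemini" else pvTailB s
      else if provider = "huggingface".toList ∧ remainder ≠ [] then
        if h2 : PySem.Chars.isIn ['/'] remainder = true then
          pvLoopB (pvRest remainder)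
        else none
      else pvTailB s
  else pvTailB s
termination_by s.length
decreasing_by
  · exact pvRest_length_lt s h
  · have ha := pvRest_length_lt s h
    have hb := pvRest_length_lt _ h2
    rw [show remainder = pvRest s from rfl] at hb
    omega

def infer_candidate_family_alt (model_id : String) : Option String :=
  pvLoopB (PySem.Chars.lower model_id.toList)

-- ===== PRECONDITION & SPEC =====
def Spec_infer_candidate_family (model_id : String) (out : Option String) : Prop := out = infer_candidate_family_alt model_id
instance (model_id : String) (out : Option String) : Decidable (Spec_infer_candidate_family model_id out) := by unfold Spec_infer_candidate_family; infer_instance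

-- ===== CLAIM (what is proved, stated in full; the proofs are below) =====
def Claim_equal_infer_candidate_family : Prop := ∀ (model_id : String), Dom_infer_candidate_family model_id → Spec_infer_candidate_family model_id (infer_candidate_family model_id)

-- ===== LEMMAS AND PROOFS =====

theorem pv_lowerChar_idem (c : Char) :
    PySem.Chars.lowerChar (PySem.Chars.lowerChar c) = PySem.Chars.lowerChar c := by
  unfold PySem.Chars.lowerChar PySem.Chars.isupper
  by_cases h1 : 'A' ≤ c ∧ c ≤ 'Z'
  · have h90 : c.toNat ≤ 90 := by
      have := h1.2; rw [Char.le_def] at this; exact_mod_cast this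
    have ht : (Char.ofNat (c.toNat + 32)).toNat = c.toNat + 32 := by
      rw [Char.toNat_ofNat]
      simp [Nat.isValidChar]
      omega
    simp only [h1.1, h1.2, decide_true, Bool.and_self, if_true]
    rw [if_neg]
    simp only [Bool.and_eq_true, decide_eq_true_eq, Char.le_def, not_and]
    intro _ hcon
    have h2 : (Char.ofNat (c.toNat + 32)).toNat ≤ 90 := by exact_mod_cast hcon
    rw [ht] at h2
    have h65 : 65 ≤ c.toNat := by
      have := h1.1; rw [Char.le_def] at this; exact_mod_cast this
    omega
  · have : ¬ ((decide ('A' ≤ c) && decide (c ≤ 'Z')) = true) := by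
      simp only [Bool.and_eq_true, decide_eq_true_eq]; tauto
    rw [if_neg this, if_neg this]

-- any list whose members all come from a lowercased list is fixed by lower
theorem pv_lower_fixed (l m : List Char) (hm : ∀ c ∈ m, c ∈ PySem.Chars.lower l) :
    PySem.Chars.lower m = m := by
  unfold PySem.Chars.lower
  conv_rhs => rw [← List.map_id m]
  apply List.map_congr_left
  intro c hc
  obtain ⟨d, _, rfl⟩ := List.mem_map.1 (hm c hc)
  exact pv_lowerChar_idem d

theorem pv_length_lower (l : List Char) : (PySem.Chars.lower l).length = l.length := by
  simp [PySem.Chars.lower]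

theorem pv_markers_eq (l : List Char) (hl : l ≠ []) : pvMarkersA l = pvTailB l := by
  unfold pvMarkersA pvTailB pvMarkerFamily
  simp only [List.any_cons, List.any_nil, List.find?, hl]
  by_cases h1 : PySem.Chars.isIn "claude".toList l = true <;>
  by_cases h2 : PySem.Chars.isIn "sonnet".toList l = true <;>
  by_cases h3 : PySem.Chars.isIn "opus".toList l = true <;>
  by_cases h4 : PySem.Chars.isIn "haiku".toList l = true <;>
  by_cases h5 : PySem.Chars.isIn "gemini".toList l = true <;>
  simp_all

theorem pvRest_subset (l : List Char) : pvRest l ⊆ l :=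
  ((List.tail_sublist _).trans (List.dropWhile_sublist _)).subset

theorem pv_dict_eq (p : List Char) : PySem.Dict.get? pvProviderFamily p =
    if p = "anthropic".toList ∨ p = "claude".toList then some "claude"
    else if p = "gemini".toList ∨ p = "google".toList then some "gemini"
    else if p = "openai".toList then some "openai" else none := by
  by_cases h1 : "anthropic".toList = p
  · subst h1; decide
  by_cases h2 : "claude".toList = p
  · subst h2; decide
  by_cases h3 : "gemini".toList = p
  · subst h3; decide
  by_cases h4 : "google".toList = p
  · subst h4; decide
  by_cases h5 : "openai".toList = p
  · subst h5; decide
  have e1 := beq_eq_false_iff_ne.2 h1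
  have e2 := beq_eq_false_iff_ne.2 h2
  have e3 := beq_eq_false_iff_ne.2 h3
  have e4 := beq_eq_false_iff_ne.2 h4
  have e5 := beq_eq_false_iff_ne.2 h5
  simp only [pvProviderFamily, PySem.Dict.get?, List.find?, e1, e2, e3, e4, e5]
  rw [if_neg (by rintro (rfl | rfl); exacts [h1 (by decide), h2 (by decide)]),
      if_neg (by rintro (rfl | rfl); exacts [h3 (by decide), h4 (by decide)]),
      if_neg (by rintro rfl; exact h5 (by decide))]
  rfl

theorem pv_main : ∀ (n : Nat) (cs : List Char), cs.length ≤ n →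
    pvInferA cs = pvLoopB (PySem.Chars.lower cs) := by
  intro n
  induction n with
  | zero =>
    intro cs hc
    have hcs : cs = [] := List.eq_nil_of_length_eq_zero (Nat.le_zero.1 hc)
    subst hcs
    rw [pvInferA, pvLoopB]
    simp [PySem.Chars.lower]
  | succ n IH =>
    intro cs hc
    by_cases hcs : cs = []
    · subst hcs; rw [pvInferA, pvLoopB]; simp [PySem.Chars.lower]
    have hlne : PySem.Chars.lower cs ≠ [] := by
      intro h0
      have := congrArg List.length h0
      rw [pv_length_lower] at this
      exact hcs (List.eq_nil_of_length_eq_zero this)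
    rw [pvInferA, pvLoopB]
    rw [if_neg hcs, if_neg hlne]
    by_cases hs : PySem.Chars.isIn ['/'] (PySem.Chars.lower cs) = true
    · simp only [hs, dite_true, pv_dict_eq]
      set l := PySem.Chars.lower cs with hldef
      have hlen : l.length = cs.length := pv_length_lower cs
      have hfix : ∀ m : List Char, m ⊆ l → PySem.Chars.lower m = m := fun m hm =>
        pv_lower_fixed cs m (fun c hc => hm hc)
      have hrsub : pvRest l ⊆ l := pvRest_subset l
      have hrlen : (pvRest l).length < l.length := pvRest_length_lt l hs
      by_cases c1 : pvHead l = "anthropic".toList ∨ pvHead l = "claude".toList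
      · rw [if_pos c1, if_pos c1]
      by_cases c2 : pvHead l = "gemini".toList ∨ pvHead l = "google".toList
      · rw [if_neg c1, if_neg c1, if_pos c2, if_pos c2]
      by_cases c3 : pvHead l = "openai".toList
      · rw [if_neg c1, if_neg c1, if_neg c2, if_neg c2, if_pos c3, if_pos c3]
      simp only [if_neg c1, if_neg c2, if_neg c3]
      by_cases c4 : pvHead l = "openrouter".toList ∧ pvRest l ≠ []
      · rw [if_pos c4, if_pos c4, IH (pvRest l) (by omega), hfix _ hrsub]
      rw [if_neg c4, if_neg c4]
      by_cases cv : pvHead l = "vertexai".toList ∨ pvHead l = "vertex_ai".toList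
      · rw [if_pos cv]
        by_cases cg : PySem.Chars.isIn "gemini".toList (pvRest l) = true
        · rw [if_pos ⟨cv, cg⟩, if_pos cg]
        · rw [if_neg (fun hcon => cg hcon.2), if_neg cg]
          have chf : ¬ (pvHead l = "huggingface".toList ∧ pvRest l ≠ []) := by
            rcases cv with hv | hv <;> rw [hv] <;> rintro ⟨hcon, -⟩ <;> exact absurd hcon (by decide)
          rw [if_neg chf]
          exact pv_markers_eq l hlne
      rw [if_neg (fun hcon => cv hcon.1), if_neg cv]
      by_cases chf : pvHead l = "huggingface".toList ∧ pvRest l ≠ []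
      · rw [if_pos chf, if_pos chf]
        by_cases h2 : PySem.Chars.isIn ['/'] (pvRest l) = true
        · rw [dif_pos h2, dif_pos h2]
          have hsub2 : pvRest (pvRest l) ⊆ l := (pvRest_subset _).trans hrsub
          have hrlen2 : (pvRest (pvRest l)).length < (pvRest l).length := pvRest_length_lt _ h2
          have heq : pvInferA (pvRest (pvRest l)) = pvLoopB (pvRest (pvRest l)) := by
            rw [IH _ (by omega), hfix _ hsub2]
          rw [heq]
          cases pvLoopB (pvRest (pvRest l)) <;> rfl
        · rw [dif_neg h2, dif_neg h2]
      · rw [if_neg chf, if_neg chf]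
        exact pv_markers_eq l hlne
    · rw [dif_neg hs, dif_neg hs]
      exact pv_markers_eq _ hlne

theorem infer_candidate_family_spec : Claim_equal_infer_candidate_family := by
  intro model_id _
  unfold Spec_infer_candidate_family infer_candidate_family infer_candidate_family_alt
  exact pv_main model_id.toList.length model_id.toList le_rfl
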